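-- pv_equiv track=rewrite | github.com/pdiazogni-cars/leads_api | import_zipcodes.py | prep_fields
-- ===== SOURCE A (Python) =====
-- from typing import List, Tuple, Text, Dict, Optional
--
-- def prep_fields(fields_size_map):
--     """
--     This is kind of an odd use case, but to support easier configuration (e.g.
--     the "zip" field is 5 characters long, or ``[("zip", 5)]``), this helper
--     will convert it to ``[("zip", 0, 5)]`` so we can index "95111"[0:5] and know
--     that field's name is "zip".
--     """
--     result: List[Tuple[Text, int, int]] = []
--     start = 0
--     for (name, length) in fields_size_map.items():
--         end = start + length
--         if not name.startswith('_'):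
--             result.append((name, start, end))
--         start += length
--     return result
-- ===== SOURCE B (Python) =====
-- def prep_fields(fields_size_map):
--     """
--     Convert {"zip": 5, ...} into [("zip", 0, 5), ...]: first build the table
--     of cumulative end offsets over ALL fields, then pair each name with its
--     (start, end) slice, dropping names that start with '_'.
--     """
--     total = 0
--     ends = [0]
--     for _, length in fields_size_map.items():
--         total += length
--         ends.append(total)
--     names = [name for name, _ in fields_size_map.items()]
--     return [(n, s, e)
--             for n, (s, e) in zip(names, zip(ends, ends[1:]))
--             if not n.startswith('_')]
-- ===== Notes on version B (the rewrite author's own statement) =====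
-- stated objective: alternative
-- what changed: Replaces A's single loop with a running start and conditional append by a two-phase decomposition: first compute the cumulative end-offset table over all fields, then a separate zip/filter pass pairing each name with its consecutive (start, end) offsets.
import Mathlib
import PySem

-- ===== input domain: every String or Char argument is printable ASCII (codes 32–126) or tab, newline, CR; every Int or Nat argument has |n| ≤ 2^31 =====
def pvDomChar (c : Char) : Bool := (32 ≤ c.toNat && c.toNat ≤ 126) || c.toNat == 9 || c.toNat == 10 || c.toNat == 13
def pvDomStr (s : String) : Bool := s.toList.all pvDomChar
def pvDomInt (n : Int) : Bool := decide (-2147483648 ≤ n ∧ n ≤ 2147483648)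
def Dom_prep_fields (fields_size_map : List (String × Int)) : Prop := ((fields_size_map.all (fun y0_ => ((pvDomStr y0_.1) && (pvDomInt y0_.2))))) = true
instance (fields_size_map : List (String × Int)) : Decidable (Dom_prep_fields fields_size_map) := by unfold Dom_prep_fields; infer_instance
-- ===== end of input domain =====

-- B replaces A's single running-start loop by a two-phase decomposition (cumulative end table, then a zip/filter pass); same cost, proved equal on all inputs.


-- ===== PORT A =====
-- A: one pass; running start, conditional append, then start += length.
def prep_fields (fields_size_map : List (String × Int)) : List (String × Int × Int) :=
  (fields_size_map.foldl
    (fun (acc : List (String × Int × Int) × Int) p =>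
      let e := acc.2 + p.2
      ((if PySem.Str.startswith p.1 "_" then acc.1 else acc.1 ++ [(p.1, acc.2, e)]), acc.2 + p.2))
    ([], 0)).1

-- ===== PORT B =====
-- B: phase 1 builds the cumulative end-offset table over ALL fields;
-- phase 2 zips names with consecutive (start, end) pairs and filters '_' names.
def prep_fields_alt (fields_size_map : List (String × Int)) : List (String × Int × Int) :=
  let st := fields_size_map.foldl
    (fun (ac : List Int × Int) p =>
      let total := ac.2 + p.2
      (ac.1 ++ [total], total)) ([0], 0)
  let ends := st.1
  let names := fields_size_map.map Prod.fst
  ((names.zip (ends.zip (ends.drop 1))).filter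
      (fun q => !(PySem.Str.startswith q.1 "_"))).map
    (fun q => (q.1, q.2.1, q.2.2))

-- ===== PRECONDITION & SPEC =====
def Spec_prep_fields (fields_size_map : List (String × Int)) (out : List (String × Int × Int)) : Prop := out = prep_fields_alt fields_size_map
instance (fields_size_map : List (String × Int)) (out : List (String × Int × Int)) : Decidable (Spec_prep_fields fields_size_map out) := by unfold Spec_prep_fields; infer_instance

-- ===== CLAIM (what is proved, stated in full; the proofs are below) =====
def Claim_equal_prep_fields : Prop := ∀ (fields_size_map : List (String × Int)), Dom_prep_fields fields_size_map → Spec_prep_fields fields_size_map (prep_fields fields_size_map)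

-- ===== LEMMAS AND PROOFS =====

-- reference recursion: items emitted from start offset s
def pvGo : List (String × Int) → Int → List (String × Int × Int)
  | [], _ => []
  | (n, l) :: rest, s =>
      (if PySem.Str.startswith n "_" then [] else [(n, s, s + l)]) ++ pvGo rest (s + l)

-- the end-offset list from running total t
def pvScan : List (String × Int) → Int → List Int
  | [], _ => []
  | p :: rest, t => (t + p.2) :: pvScan rest (t + p.2)

theorem pvA_go (m : List (String × Int)) :
    ∀ (res : List (String × Int × Int)) (s : Int),
      (m.foldl
        (fun (acc : List (String × Int × Int) × Int) p =>
          let e := acc.2 + p.2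
          ((if PySem.Str.startswith p.1 "_" then acc.1 else acc.1 ++ [(p.1, acc.2, e)]), acc.2 + p.2))
        (res, s)).1 = res ++ pvGo m s := by
  induction m with
  | nil => intro res s; simp [pvGo]
  | cons p rest ih =>
      intro res s
      obtain ⟨n, l⟩ := p
      simp only [List.foldl_cons, pvGo]
      rw [ih]
      by_cases h : PySem.Chars.startswith n.toList ['_'] = true <;> simp [h]

theorem pvB_ends (m : List (String × Int)) :
    ∀ (ac : List Int) (t : Int),
      (m.foldl
        (fun (ac : List Int × Int) p =>
          let total := ac.2 + p.2
          (ac.1 ++ [total], total)) (ac, t)).1 = ac ++ pvScan m t := by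
  induction m with
  | nil => intro ac t; simp [pvScan]
  | cons p rest ih =>
      intro ac t
      simp only [List.foldl_cons, pvScan]
      rw [ih]
      simp

theorem pvB_go (m : List (String × Int)) :
    ∀ (t : Int),
      (((m.map Prod.fst).zip ((t :: pvScan m t).zip (pvScan m t))).filter
          (fun q => !(PySem.Str.startswith q.1 "_"))).map
        (fun q => (q.1, q.2.1, q.2.2)) = pvGo m t := by
  induction m with
  | nil => intro t; simp [pvGo]
  | cons p rest ih =>
      intro t
      obtain ⟨n, l⟩ := p
      simp only [List.map_cons, pvScan, pvGo, List.zip_cons_cons, List.filter_cons]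
      have h2 := ih (t + l)
      by_cases h : PySem.Chars.startswith n.toList ['_'] = true <;>
        (simp at h2; simp [h, h2])

-- ===== VERDICT (by name: the statement is the Claim_ definition above) =====
theorem prep_fields_spec : Claim_equal_prep_fields := by
  intro m _
  unfold Spec_prep_fields
  show prep_fields m = prep_fields_alt m
  simp only [prep_fields, prep_fields_alt]
  rw [pvA_go, pvB_ends]
  simp only [List.nil_append, List.cons_append, List.singleton_append, List.drop_succ_cons,
    List.drop_zero]
  exact (pvB_go m 0).symm
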